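-- pv_equiv track=rewrite | github.com/jindal2309/Algorithms-Project | main.py | genPossibleMoves
-- ===== SOURCE A (Python) =====
-- def genPossibleMoves(CAP_BOAT):
-- 	moves = []
-- 	for m in range(CAP_BOAT + 1):
-- 		for c in range(CAP_BOAT + 1):
-- 			if 0 < m < c:
-- 				continue
-- 			if 1 <= m + c <= CAP_BOAT:
-- 				moves.append((m, c))
-- 	return moves
-- ===== SOURCE B (Python) =====
-- def genPossibleMoves(CAP_BOAT):
--     def column(m):
--         lo = 1 if m == 0 else 0
--         hi = CAP_BOAT if m == 0 else min(m, CAP_BOAT - m)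
--         return [(m, c) for c in range(lo, hi + 1)]
--     return [pair for m in range(CAP_BOAT + 1) for pair in column(m)]
-- ===== Notes on version B (the rewrite author's own statement) =====
-- stated objective: alternative
-- what changed: A's doubly nested filtered accumulator loop is replaced by a flat concatenation (flatMap) of per-m columns, each column produced in closed form as a map over the exact valid c-range (1..CAP_BOAT when m==0, else 0..min(m, CAP_BOAT-m)) with no conditionals and no accumulator.
import Mathlib
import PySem

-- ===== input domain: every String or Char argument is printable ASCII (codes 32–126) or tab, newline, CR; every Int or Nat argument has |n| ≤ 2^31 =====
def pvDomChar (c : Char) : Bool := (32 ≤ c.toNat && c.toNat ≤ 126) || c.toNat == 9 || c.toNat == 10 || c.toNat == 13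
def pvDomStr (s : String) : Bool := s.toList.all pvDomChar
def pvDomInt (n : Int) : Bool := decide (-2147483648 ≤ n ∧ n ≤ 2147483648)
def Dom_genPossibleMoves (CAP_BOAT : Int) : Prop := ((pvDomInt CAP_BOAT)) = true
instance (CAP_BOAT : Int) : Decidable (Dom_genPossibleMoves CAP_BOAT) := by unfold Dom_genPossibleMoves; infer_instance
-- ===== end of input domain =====

-- B replaces A's doubly nested filtered accumulator loop by a flat concatenation of
-- per-m columns, each column a closed-form range of valid c values mapped to pairs.

-- ===== PORT A =====
def genPossibleMoves (CAP_BOAT : Int) : List (Int × Int) :=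
  (PySem.List.pyRange 0 (CAP_BOAT + 1) 1).foldl (fun moves m =>
    (PySem.List.pyRange 0 (CAP_BOAT + 1) 1).foldl (fun moves c =>
      if 0 < m ∧ m < c then moves
      else if 1 ≤ m + c ∧ m + c ≤ CAP_BOAT then moves ++ [(m, c)]
      else moves) moves) []

-- ===== PORT B =====
-- Source B's helper column(m): the valid c-range for this m, in closed form
def pvColumn (CAP_BOAT m : Int) : List (Int × Int) :=
  let lo : Int := if m == 0 then 1 else 0
  let hi : Int := if m == 0 then CAP_BOAT else min m (CAP_BOAT - m)
  (PySem.List.pyRange lo (hi + 1) 1).map (fun c => (m, c))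

def genPossibleMoves_alt (CAP_BOAT : Int) : List (Int × Int) :=
  (PySem.List.pyRange 0 (CAP_BOAT + 1) 1).flatMap (pvColumn CAP_BOAT)

-- ===== PRECONDITION & SPEC =====
def Spec_genPossibleMoves (CAP_BOAT : Int) (out : List (Int × Int)) : Prop := out = genPossibleMoves_alt CAP_BOAT
instance (CAP_BOAT : Int) (out : List (Int × Int)) : Decidable (Spec_genPossibleMoves CAP_BOAT out) := by unfold Spec_genPossibleMoves; infer_instance

-- ===== CLAIM (what is proved, stated in full; the proofs are below) =====
def Claim_equal_genPossibleMoves : Prop := ∀ (CAP_BOAT : Int), Dom_genPossibleMoves CAP_BOAT → Spec_genPossibleMoves CAP_BOAT (genPossibleMoves CAP_BOAT)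

-- ===== LEMMAS AND PROOFS =====

-- filtering a step-1 range by an interval predicate yields the sub-range
theorem filter_pyRange_interval (a b lo hi : Int) (p : Int → Bool)
    (hlo : a ≤ lo) (hlh : lo ≤ hi) (hhi : hi ≤ b)
    (h : ∀ x, a ≤ x → x < b → (p x = true ↔ lo ≤ x ∧ x < hi)) :
    (PySem.List.pyRange a b 1).filter p = PySem.List.pyRange lo hi 1 := by
  rw [PySem.List.pyRange_one_append a lo b hlo (le_trans hlh hhi),
      PySem.List.pyRange_one_append lo hi b hlh hhi,
      List.filter_append, List.filter_append]
  have h1 : (PySem.List.pyRange a lo 1).filter p = [] := by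
    apply List.filter_eq_nil_iff.mpr
    intro x hx
    have := (PySem.List.mem_pyRange_one).mp hx
    intro hp
    have := (h x this.1 (lt_of_lt_of_le this.2 (le_trans hlh hhi))).mp hp
    omega
  have h2 : (PySem.List.pyRange lo hi 1).filter p = PySem.List.pyRange lo hi 1 := by
    apply List.filter_eq_self.mpr
    intro x hx
    have := (PySem.List.mem_pyRange_one).mp hx
    exact (h x (le_trans hlo this.1) (lt_of_lt_of_le this.2 hhi)).mpr ⟨this.1, this.2⟩
  have h3 : (PySem.List.pyRange hi b 1).filter p = [] := by
    apply List.filter_eq_nil_iff.mpr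
    intro x hx
    have := (PySem.List.mem_pyRange_one).mp hx
    intro hp
    have := (h x (le_trans (le_trans hlo hlh) this.1) this.2).mp hp
    omega
  rw [h1, h2, h3]
  simp

-- for each m of the outer range, A's inner filtered scan produces exactly acc ++ pvColumn K m
theorem innerA_eq_column (K m : Int) (hm0 : 0 ≤ m) (hmK : m < K + 1) (acc : List (Int × Int)) :
    (PySem.List.pyRange 0 (K + 1) 1).foldl (fun moves c =>
      if 0 < m ∧ m < c then moves
      else if 1 ≤ m + c ∧ m + c ≤ K then moves ++ [(m, c)]
      else moves) acc
    = acc ++ pvColumn K m := by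
  have hstep : (PySem.List.pyRange 0 (K + 1) 1).foldl (fun moves c =>
      if 0 < m ∧ m < c then moves
      else if 1 ≤ m + c ∧ m + c ≤ K then moves ++ [(m, c)]
      else moves) acc
    = (PySem.List.pyRange 0 (K + 1) 1).foldl (fun moves c =>
        if (decide (¬ (0 < m ∧ m < c) ∧ (1 ≤ m + c ∧ m + c ≤ K)) : Bool)
        then moves ++ [(m, c)] else moves) acc := by
    apply PySem.List.foldl_congr_mem
    intro acc' c _
    by_cases h1 : 0 < m ∧ m < c <;> by_cases h2 : 1 ≤ m + c ∧ m + c ≤ K <;>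
      simp [h1, h2]
  rw [hstep, PySem.List.foldl_append_if]
  unfold pvColumn
  by_cases hm : m = 0
  · subst hm
    simp only [beq_self_eq_true, if_pos]
    rw [filter_pyRange_interval 0 (K + 1) 1 (K + 1) _ (by omega) (by omega) (by omega)]
    intro x hx hx'
    simp only [decide_eq_true_eq]
    omega
  · simp only [beq_iff_eq, if_neg hm]
    rw [filter_pyRange_interval 0 (K + 1) 0 (min m (K - m) + 1) _ (by omega) (by omega) (by omega)]
    intro x hx hx'
    simp only [decide_eq_true_eq]
    omega

-- ===== VERDICT (by name: the statement is the Claim_ definition above) =====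
theorem genPossibleMoves_spec : Claim_equal_genPossibleMoves := by
  intro K _
  unfold Spec_genPossibleMoves genPossibleMoves genPossibleMoves_alt
  rw [PySem.List.foldl_congr_mem (g := fun acc m => acc ++ pvColumn K m)]
  · exact PySem.List.foldl_append_eq_flatMap _ _ _
  · intro acc m hm
    have := (PySem.List.mem_pyRange_one).mp hm
    exact innerA_eq_column K m this.1 this.2 acc
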